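-- pv_equiv track=rewrite | github.com/BuddyDudeGuy/Enbridge-Case-Competition | src/data/build_thermal_harmonization.py | classify_sensor
-- ===== SOURCE A (Python) =====
-- def classify_sensor(description):
--     """Classify a temperature sensor into a thermal subsystem based on description."""
--     desc = description.lower().strip()
--
--     # --- Gearbox ---
--     if any(kw in desc for kw in ['gearbox', 'gear box', 'gear oil', 'planetary bearing']):
--         return 'gearbox'
--
--     # --- Generator/Bearings ---
--     if any(kw in desc for kw in ['generator bearing', 'stator winding', 'generator temperature',
--                                    'generator cooling', 'slip ring', 'rotor bearing']):
--         return 'generator_bearings'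
--
--     # --- Transformer ---
--     if any(kw in desc for kw in ['transformer', 'transformator', 'hv transformer']):
--         return 'transformer'
--
--     # --- Hydraulic ---
--     if any(kw in desc for kw in ['hydraulic']):
--         return 'hydraulic'
--
--     # --- Nacelle/Ambient ---
--     # Exclude "electrical cabinet ambient" — that's cabinet, not nacelle
--     if 'electrical cabinet' in desc:
--         return 'unmatched'
--     if any(kw in desc for kw in ['ambient', 'nacelle temp', 'outside temp',
--                                    'nacelle outside', 'hub temp']):
--         return 'nacelle_ambient'
--
--     # --- Cooling ---
--     if any(kw in desc for kw in ['cooling', 'vcs', 'water temp', 'cooler',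
--                                    'water cooler']):
--         return 'cooling'
--
--     # --- Additional patterns for edge cases ---
--     # Axial bearing -> generator/bearings
--     if 'axial bearing' in desc:
--         return 'generator_bearings'
--
--     # Motor temperature (pitch motors) -> unmatched
--     if 'motor temp' in desc:
--         return 'unmatched'
--
--     # Converter/inverter -> unmatched (electrical, not thermal subsystem)
--     if any(kw in desc for kw in ['converter', 'inverter', 'igbt']):
--         return 'unmatched'
--
--     # Electrical cabinet -> unmatched
--     if any(kw in desc for kw in ['electrical cabinet', 'control box', 'board temp',
--                                    'busbar', 'split ring chamber', 'platform']):
--         return 'unmatched'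
--
--     # Hub controller / top nacelle controller -> nacelle_ambient
--     if any(kw in desc for kw in ['hub controller', 'top nacelle controller', 'nose cone']):
--         return 'nacelle_ambient'
--
--     # VCP-board, choke coils -> cooling (VCS related)
--     if any(kw in desc for kw in ['vcp-board', 'choke coil']):
--         return 'cooling'
--
--     # Transformer oil temps in Farm C
--     if 'oil temp' in desc and ('transformer' in desc or 'eb transformer' in desc):
--         return 'transformer'
--
--     return 'unmatched'
-- ===== SOURCE B (Python) =====
-- # Hash-index multi-pattern matcher: instead of scanning the description once per keyword,
-- # slide a window over the description and look each window up in a keyword dict, keeping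
-- # the hit of highest priority (lowest rule index); first-match-by-priority as in A.
-- RULES = [
--     ('gearbox', 'gearbox'), ('gear box', 'gearbox'), ('gear oil', 'gearbox'),
--     ('planetary bearing', 'gearbox'),
--     ('generator bearing', 'generator_bearings'), ('stator winding', 'generator_bearings'),
--     ('generator temperature', 'generator_bearings'), ('generator cooling', 'generator_bearings'),
--     ('slip ring', 'generator_bearings'), ('rotor bearing', 'generator_bearings'),
--     ('transformer', 'transformer'), ('transformator', 'transformer'),
--     ('hydraulic', 'hydraulic'),
--     ('electrical cabinet', 'unmatched'),
--     ('ambient', 'nacelle_ambient'), ('nacelle temp', 'nacelle_ambient'),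
--     ('outside temp', 'nacelle_ambient'), ('nacelle outside', 'nacelle_ambient'),
--     ('hub temp', 'nacelle_ambient'),
--     ('cooling', 'cooling'), ('vcs', 'cooling'), ('water temp', 'cooling'), ('cooler', 'cooling'),
--     ('axial bearing', 'generator_bearings'),
--     ('motor temp', 'unmatched'),
--     ('converter', 'unmatched'), ('inverter', 'unmatched'), ('igbt', 'unmatched'),
--     ('control box', 'unmatched'), ('board temp', 'unmatched'), ('busbar', 'unmatched'),
--     ('split ring chamber', 'unmatched'), ('platform', 'unmatched'),
--     ('hub controller', 'nacelle_ambient'), ('top nacelle controller', 'nacelle_ambient'),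
--     ('nose cone', 'nacelle_ambient'),
--     ('vcp-board', 'cooling'), ('choke coil', 'cooling'),
-- ]
--
-- KEYMAP = {kw: (i, label) for i, (kw, label) in enumerate(RULES)}
-- LENGTHS = sorted({len(kw) for kw in KEYMAP})
--
--
-- def classify_sensor(description):
--     """Classify a temperature sensor into a thermal subsystem based on description."""
--     desc = description.lower().strip()
--     best = None
--     for i in range(len(desc)):
--         for L in LENGTHS:
--             hit = KEYMAP.get(desc[i:i + L])
--             if hit is not None and (best is None or hit[0] < best[0]):
--                 best = hit
--     return best[1] if best is not None else 'unmatched'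
-- ===== Notes on version B (the rewrite author's own statement) =====
-- stated objective: alternative
-- what changed: Replaces A's per-keyword substring cascade (39 separate 'kw in desc' scans tried in priority order) by a hash-index multi-pattern matcher: a dict maps each keyword to (priority,label), a window of each keyword length is slid once over the description and looked up in the dict, and the minimum-priority hit wins; redundant keywords subsumed by earlier rules ('hv transformer', 'water cooler', the dead oil-temp/transformer rule) disappear as data.
import Mathlib
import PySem

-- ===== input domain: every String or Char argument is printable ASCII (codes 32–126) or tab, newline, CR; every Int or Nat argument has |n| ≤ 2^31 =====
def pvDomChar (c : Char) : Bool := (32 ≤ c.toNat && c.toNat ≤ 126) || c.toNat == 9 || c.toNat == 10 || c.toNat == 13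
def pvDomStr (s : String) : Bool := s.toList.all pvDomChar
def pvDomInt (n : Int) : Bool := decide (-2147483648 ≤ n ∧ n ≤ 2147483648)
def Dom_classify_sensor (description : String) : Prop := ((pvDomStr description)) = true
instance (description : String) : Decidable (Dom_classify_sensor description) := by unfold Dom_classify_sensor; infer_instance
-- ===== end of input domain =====

-- B replaces A's per-keyword substring cascade by a hash-index window scan: each window of the
-- description is looked up in a keyword dict and the minimum-priority hit wins; same result.
-- ===== PORT A =====
def classify_sensor (description : String) : String :=
  let desc := PySem.Str.strip (PySem.Str.lower description)
  if ["gearbox", "gear box", "gear oil", "planetary bearing"].any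
        (fun kw => PySem.Str.isIn kw desc) then "gearbox"
  else if ["generator bearing", "stator winding", "generator temperature",
           "generator cooling", "slip ring", "rotor bearing"].any
        (fun kw => PySem.Str.isIn kw desc) then "generator_bearings"
  else if ["transformer", "transformator", "hv transformer"].any
        (fun kw => PySem.Str.isIn kw desc) then "transformer"
  else if ["hydraulic"].any (fun kw => PySem.Str.isIn kw desc) then "hydraulic"
  else if PySem.Str.isIn "electrical cabinet" desc then "unmatched"
  else if ["ambient", "nacelle temp", "outside temp", "nacelle outside", "hub temp"].any
        (fun kw => PySem.Str.isIn kw desc) then "nacelle_ambient"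
  else if ["cooling", "vcs", "water temp", "cooler", "water cooler"].any
        (fun kw => PySem.Str.isIn kw desc) then "cooling"
  else if PySem.Str.isIn "axial bearing" desc then "generator_bearings"
  else if PySem.Str.isIn "motor temp" desc then "unmatched"
  else if ["converter", "inverter", "igbt"].any (fun kw => PySem.Str.isIn kw desc) then "unmatched"
  else if ["electrical cabinet", "control box", "board temp", "busbar",
           "split ring chamber", "platform"].any
        (fun kw => PySem.Str.isIn kw desc) then "unmatched"
  else if ["hub controller", "top nacelle controller", "nose cone"].any
        (fun kw => PySem.Str.isIn kw desc) then "nacelle_ambient"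
  else if ["vcp-board", "choke coil"].any (fun kw => PySem.Str.isIn kw desc) then "cooling"
  else if PySem.Str.isIn "oil temp" desc &&
          (PySem.Str.isIn "transformer" desc || PySem.Str.isIn "eb transformer" desc) then
    "transformer"
  else "unmatched"

-- ===== PORT B =====
-- RULES of Source B
def pvRules : List (String × String) :=
  [("gearbox", "gearbox"), ("gear box", "gearbox"), ("gear oil", "gearbox"),
   ("planetary bearing", "gearbox"),
   ("generator bearing", "generator_bearings"), ("stator winding", "generator_bearings"),
   ("generator temperature", "generator_bearings"), ("generator cooling", "generator_bearings"),
   ("slip ring", "generator_bearings"), ("rotor bearing", "generator_bearings"),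
   ("transformer", "transformer"), ("transformator", "transformer"),
   ("hydraulic", "hydraulic"),
   ("electrical cabinet", "unmatched"),
   ("ambient", "nacelle_ambient"), ("nacelle temp", "nacelle_ambient"),
   ("outside temp", "nacelle_ambient"), ("nacelle outside", "nacelle_ambient"),
   ("hub temp", "nacelle_ambient"),
   ("cooling", "cooling"), ("vcs", "cooling"), ("water temp", "cooling"), ("cooler", "cooling"),
   ("axial bearing", "generator_bearings"),
   ("motor temp", "unmatched"),
   ("converter", "unmatched"), ("inverter", "unmatched"), ("igbt", "unmatched"),
   ("control box", "unmatched"), ("board temp", "unmatched"), ("busbar", "unmatched"),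
   ("split ring chamber", "unmatched"), ("platform", "unmatched"),
   ("hub controller", "nacelle_ambient"), ("top nacelle controller", "nacelle_ambient"),
   ("nose cone", "nacelle_ambient"),
   ("vcp-board", "cooling"), ("choke coil", "cooling")]

-- KEYMAP = {kw: (i, label) for i, (kw, label) in enumerate(RULES)}
def pvKeymap : PySem.Dict String (Int × String) :=
  PySem.Dict.ofList ((PySem.List.enumerate pvRules).map (fun e => (e.2.1, (e.1, e.2.2))))

-- LENGTHS = sorted({len(kw) for kw in KEYMAP})
def pvLengths : List Int :=
  PySem.List.sorted (PySem.Set.ofList (pvKeymap.keys.map (fun k => PySem.Str.len k)))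
    (fun x => x) false

def classify_sensor_alt (description : String) : String :=
  let desc := PySem.Str.strip (PySem.Str.lower description)
  let best :=
    (PySem.List.pyRange 0 (PySem.Str.len desc) 1).foldl
      (fun best i =>
        pvLengths.foldl
          (fun best L =>
            match pvKeymap.get? (PySem.Str.slice desc (some i) (some (i + L))) with
            | none => best
            | some hit =>
              match best with
              | none => some hit
              | some b => if hit.1 < b.1 then some hit else best)
          best)
      (none : Option (Int × String))
  match best with
  | some b => b.2
  | none => "unmatched"

-- ===== PRECONDITION & SPEC =====
def Spec_classify_sensor (description : String) (out : String) : Prop := out = classify_sensor_alt description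
instance (description : String) (out : String) : Decidable (Spec_classify_sensor description out) := by unfold Spec_classify_sensor; infer_instance

-- ===== CLAIM (what is proved, stated in full; the proofs are below) =====
def Claim_equal_classify_sensor : Prop := ∀ (description : String), Dom_classify_sensor description → Spec_classify_sensor description (classify_sensor description)

-- ===== LEMMAS AND PROOFS =====

-- the rules indexed by priority, and the (priority,label) values the dict stores
def pvIR : List (Int × String × String) := PySem.List.enumerate pvRules

-- first-match keyword scan (the common specification both ports are reduced to)
def pvScanRules (rules : List (String × String)) (desc : String) : String :=
  match rules with
  | [] => "unmatched"
  | (kw, label) :: rest => if PySem.Str.isIn kw desc then label else pvScanRules rest desc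

-- the dict lookup of one window, and the list of all window hits in traversal order
def pvHitF (desc : String) (p : Int × Int) : Option (Int × String) :=
  pvKeymap.get? (PySem.Str.slice desc (some p.1) (some (p.1 + p.2)))

def pvPairsOf (desc : String) : List (Int × Int) :=
  (PySem.List.pyRange 0 (PySem.Str.len desc) 1).flatMap (fun i => pvLengths.map (fun L => (i, L)))

def pvHits (desc : String) : List (Int × String) := (pvPairsOf desc).filterMap (pvHitF desc)

-- the min-priority accumulator step of B's loop
def pvComb (b : Option (Int × String)) (x : Int × String) : Option (Int × String) :=
  match b with
  | none => some x
  | some bb => if x.1 < bb.1 then some x else some bb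

-- ---- concrete facts about the literal rule table (all by decide) ----

set_option maxRecDepth 40000 in
theorem pvRules_eq_map : pvRules = pvIR.map (fun e => (e.2.1, e.2.2)) := by decide

set_option maxRecDepth 40000 in
theorem pvKeymap_items :
    pvKeymap = PySem.Dict.mk (pvIR.map (fun e => (e.2.1, (e.1, e.2.2)))) := by decide

set_option maxRecDepth 40000 in
theorem keymap_complete : ∀ e ∈ pvIR, pvKeymap.get? e.2.1 = some (e.1, e.2.2) := by decide

set_option maxRecDepth 40000 in
theorem lengths_complete : ∀ e ∈ pvIR, PySem.Str.len e.2.1 ∈ pvLengths := by decide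

set_option maxRecDepth 40000 in
theorem kw_ne_nil : ∀ e ∈ pvIR, e.2.1.toList ≠ [] := by decide

set_option maxRecDepth 40000 in
theorem pvIR_pairwise : pvIR.Pairwise (fun a b => a.1 < b.1) := by decide

set_option maxRecDepth 40000 in
theorem lengths_nonneg : ∀ L ∈ pvLengths, 0 ≤ L := by decide

-- ---- generic lemmas ----

-- a dict lookup that succeeds found its pair among the items
theorem get?_mem {ν : Type} : ∀ (l : List (String × ν)) (s : String) (v : ν),
    (PySem.Dict.mk l).get? s = some v → (s, v) ∈ l := by
  intro l
  induction l with
  | nil => intro s v h; simp [PySem.Dict.get?] at h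
  | cons kv rest ih =>
    intro s v h
    rw [show (kv :: rest : List (String × ν)) = (kv.1, kv.2) :: rest from rfl,
        PySem.Dict.get?_mk_cons] at h
    by_cases hk : kv.1 == s
    · simp [hk] at h
      exact List.mem_cons.mpr (Or.inl (by cases kv; simp_all [beq_iff_eq]))
    · simp [hk] at h
      exact List.mem_cons.mpr (Or.inr (ih s v h))

-- a nested for-loop is a fold over the list of index pairs
theorem foldl_nested {α β γ : Type} (xs : List α) (ys : List β) (g : γ → α → β → γ) :
    ∀ (b0 : γ), xs.foldl (fun b i => ys.foldl (fun b L => g b i L) b) b0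
      = (xs.flatMap (fun i => ys.map (fun L => (i, L)))).foldl (fun b p => g b p.1 p.2) b0 := by
  induction xs with
  | nil => intro b0; rfl
  | cons x t ih =>
    intro b0
    simp only [List.foldl_cons, List.flatMap_cons, List.foldl_append, List.foldl_map, ih]

-- one step of the min accumulator
theorem pvComb_le (b : Option (Int × String)) (x : Int × String) :
    ∃ c, pvComb b x = some c ∧ c.1 ≤ x.1 ∧ (∀ bb, b = some bb → c.1 ≤ bb.1) ∧
      (c = x ∨ b = some c) := by
  cases b with
  | none => exact ⟨x, rfl, le_refl _, by simp, Or.inl rfl⟩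
  | some bb =>
    by_cases hlt : x.1 < bb.1
    · exact ⟨x, by simp [pvComb, hlt], le_refl _, by intro b' hb'; cases hb'; omega, Or.inl rfl⟩
    · exact ⟨bb, by simp [pvComb, hlt], by omega, by intro b' hb'; cases hb'; omega,
        Or.inr rfl⟩

theorem comb_none (hits : List (Int × String)) :
    ∀ (b : Option (Int × String)), hits.foldl pvComb b = none → b = none ∧ hits = [] := by
  induction hits with
  | nil => intro b h; exact ⟨h, rfl⟩
  | cons x t ih =>
    intro b h
    obtain ⟨c, hc, -⟩ := pvComb_le b x
    rw [List.foldl_cons, hc] at h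
    exact absurd ((ih _ h).1) (by simp)

theorem comb_some (hits : List (Int × String)) :
    ∀ (b : Option (Int × String)) (h : Int × String), hits.foldl pvComb b = some h →
      (h ∈ hits ∨ b = some h) ∧ (∀ h' ∈ hits, h.1 ≤ h'.1) ∧
      (∀ bb, b = some bb → h.1 ≤ bb.1) := by
  induction hits with
  | nil =>
    intro b h hr
    simp only [List.foldl_nil] at hr
    refine ⟨Or.inr hr, by simp, fun bb hbb => ?_⟩
    rw [hr] at hbb
    exact le_of_eq (congrArg Prod.fst (Option.some.inj hbb))
  | cons x t ih =>
    intro b h hr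
    obtain ⟨c, hc, hcx, hcb, hcor⟩ := pvComb_le b x
    rw [List.foldl_cons, hc] at hr
    obtain ⟨hmem, hmin, hb⟩ := ih _ h hr
    have hhc : h.1 ≤ c.1 := hb c rfl
    refine ⟨?_, ?_, ?_⟩
    · rcases hmem with hm | hm
      · exact Or.inl (List.mem_cons.mpr (Or.inr hm))
      · cases hm
        rcases hcor with rfl | hbc
        · exact Or.inl (List.mem_cons.mpr (Or.inl rfl))
        · exact Or.inr hbc
    · intro h' hh'
      rcases List.mem_cons.mp hh' with rfl | hh'
      · omega
      · exact hmin _ hh'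
    · intro bb hbb
      have := hcb bb hbb
      omega

-- ---- soundness / completeness of the window hits ----

-- every hit names a rule whose keyword occurs in desc
theorem hits_sound (desc : String) :
    ∀ h ∈ pvHits desc, ∃ e ∈ pvIR, h = (e.1, e.2.2) ∧ PySem.Str.isIn e.2.1 desc = true := by
  intro h hmem
  obtain ⟨p, hp, hf⟩ := List.mem_filterMap.mp hmem
  obtain ⟨i, hi, hL'⟩ := List.mem_flatMap.mp hp
  obtain ⟨L, hL, rfl⟩ := List.mem_map.mp hL'
  simp only [pvHitF, pvKeymap_items] at hf
  obtain ⟨e, he, heq⟩ := List.mem_map.mp (get?_mem _ _ _ hf)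
  have hkw : e.2.1 = PySem.Str.slice desc (some i) (some (i + L)) := congrArg Prod.fst heq
  have hh : h = (e.1, e.2.2) := (congrArg Prod.snd heq).symm
  refine ⟨e, he, hh, ?_⟩
  rw [PySem.Str.isIn_iff_infix, hkw]
  have h0i := (PySem.List.mem_pyRange_one.mp hi).1
  have h0L : 0 ≤ L := lengths_nonneg L hL
  obtain ⟨n, rfl⟩ : ∃ n : Nat, i = (n : Int) := ⟨i.toNat, (Int.toNat_of_nonneg h0i).symm⟩
  obtain ⟨m, rfl⟩ : ∃ m : Nat, L = (m : Int) := ⟨L.toNat, (Int.toNat_of_nonneg h0L).symm⟩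
  rw [PySem.Str.toList_slice]
  simp only [PySem.Chars.slice_eq_listSlice]
  rw [PySem.List.slice_natCast_add]
  exact ((List.take_prefix _ _).isInfix).trans ((List.drop_suffix _ _).isInfix)

theorem hits_complete (desc : String) :
    ∀ e ∈ pvIR, PySem.Str.isIn e.2.1 desc = true → (e.1, e.2.2) ∈ pvHits desc := by
  intro e he hin
  rw [PySem.Str.isIn_iff_infix] at hin
  obtain ⟨s, t, hst⟩ := hin
  have hkwpos : 0 < e.2.1.toList.length := List.length_pos_iff.mpr (kw_ne_nil e he)
  have hlen := congrArg List.length hst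
  simp only [List.length_append] at hlen
  have hslice : PySem.Str.slice desc (some (s.length : Int))
      (some ((s.length : Int) + PySem.Str.len e.2.1)) = e.2.1 := by
    apply String.toList_inj.mp
    rw [PySem.Str.toList_slice]
    simp only [PySem.Chars.slice_eq_listSlice]
    rw [PySem.Str.len_eq e.2.1, PySem.List.slice_natCast_add, ← hst, List.append_assoc,
        List.drop_left, List.take_left]
  apply List.mem_filterMap.mpr
  refine ⟨((s.length : Int), PySem.Str.len e.2.1), ?_, ?_⟩
  · apply List.mem_flatMap.mpr
    refine ⟨(s.length : Int), ?_,
      List.mem_map.mpr ⟨PySem.Str.len e.2.1, lengths_complete e he, rfl⟩⟩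
    apply PySem.List.mem_pyRange_one.mpr
    refine ⟨by positivity, ?_⟩
    rw [PySem.Str.len_eq]
    omega
  · simp only [pvHitF]
    rw [hslice]
    exact keymap_complete e he

-- first-match scan over labelled rules = label of the first surviving filtered rule
theorem scan_filter (desc : String) : ∀ (irules : List (Int × String × String)),
    pvScanRules (irules.map (fun e => (e.2.1, e.2.2))) desc =
      (match irules.filter (fun e => PySem.Str.isIn e.2.1 desc) with
       | [] => "unmatched"
       | e :: _ => e.2.2) := by
  intro irules
  induction irules with
  | nil => rfl
  | cons e t ih =>
    cases hm : PySem.Str.isIn e.2.1 desc with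
    | true => simp only [List.map_cons, pvScanRules, List.filter_cons, hm, if_true]
    | false =>
      simp only [List.map_cons, pvScanRules, List.filter_cons, hm]
      exact ih

-- the min-priority hit is the first matching rule
theorem fold_eq_scan (desc : String) :
    (match (pvHits desc).foldl pvComb none with
     | some b => b.2
     | none => "unmatched") = pvScanRules pvRules desc := by
  rw [pvRules_eq_map, scan_filter desc pvIR]
  cases hM : pvIR.filter (fun e => PySem.Str.isIn e.2.1 desc) with
  | nil =>
    cases hf : (pvHits desc).foldl pvComb none with
    | none => rfl
    | some h =>
      exfalso
      have hmem : h ∈ pvHits desc := by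
        rcases (comb_some _ _ _ hf).1 with h1 | h1
        · exact h1
        · simp at h1
      obtain ⟨e, he, -, hin⟩ := hits_sound desc h hmem
      have : e ∈ pvIR.filter (fun e => PySem.Str.isIn e.2.1 desc) :=
        List.mem_filter.mpr ⟨he, hin⟩
      rw [hM] at this
      simp at this
  | cons e rest =>
    have heM : e ∈ pvIR.filter (fun e => PySem.Str.isIn e.2.1 desc) := by
      rw [hM]; exact List.mem_cons_self
    obtain ⟨he, hin⟩ := List.mem_filter.mp heM
    have hhit : (e.1, e.2.2) ∈ pvHits desc := hits_complete desc e he hin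
    cases hf : (pvHits desc).foldl pvComb none with
    | none =>
      exfalso
      have h0 := (comb_none _ _ hf).2
      rw [h0] at hhit
      simp at hhit
    | some h =>
      obtain ⟨hmem, hmin, -⟩ := comb_some _ _ _ hf
      have hmemh : h ∈ pvHits desc := by
        rcases hmem with h1 | h1
        · exact h1
        · simp at h1
      obtain ⟨e', he', rfl, hin'⟩ := hits_sound desc h hmemh
      have hle : e'.1 ≤ e.1 := hmin _ hhit
      have he'M : e' ∈ pvIR.filter (fun e => PySem.Str.isIn e.2.1 desc) :=
        List.mem_filter.mpr ⟨he', hin'⟩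
      rw [hM] at he'M
      have hpw := pvIR_pairwise.filter (fun e => PySem.Str.isIn e.2.1 desc)
      rw [hM] at hpw
      rcases List.mem_cons.mp he'M with heq | hrest
      · rw [heq]
      · exfalso
        have := List.rel_of_pairwise_cons hpw hrest
        omega

-- collecting the successful lookups of B's loop into the hit list
theorem foldl_hitF (D : String) : ∀ (l : List (Int × Int)) (b0 : Option (Int × String)),
    l.foldl (fun b p =>
        match pvHitF D p with
        | some hit => pvComb b hit
        | none => b) b0
      = (l.filterMap (pvHitF D)).foldl pvComb b0 := by
  intro l
  induction l with
  | nil => intro b0; rfl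
  | cons p t ih =>
    intro b0
    cases hv : pvHitF D p <;>
      simp only [List.foldl_cons, List.filterMap_cons, hv, ih]

-- B's loop equals the common scan specification
theorem alt_eq_scan (description : String) :
    classify_sensor_alt description =
      pvScanRules pvRules (PySem.Str.strip (PySem.Str.lower description)) := by
  simp only [classify_sensor_alt]
  rw [foldl_nested _ _ (fun (b : Option (Int × String)) (i L : Int) =>
        match pvKeymap.get? (PySem.Str.slice (PySem.Str.strip (PySem.Str.lower description))
            (some i) (some (i + L))) with
        | none => b
        | some hit =>
          match b with
          | none => some hit
          | some bb => if hit.1 < bb.1 then some hit else b)]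
  have hfun : (fun (b : Option (Int × String)) (p : Int × Int) =>
      match pvKeymap.get? (PySem.Str.slice (PySem.Str.strip (PySem.Str.lower description))
          (some p.1) (some (p.1 + p.2))) with
      | none => b
      | some hit =>
        match b with
        | none => some hit
        | some bb => if hit.1 < bb.1 then some hit else b)
      = (fun b p =>
          match pvHitF (PySem.Str.strip (PySem.Str.lower description)) p with
          | some hit => pvComb b hit
          | none => b) := by
    funext b p
    simp only [pvHitF]
    cases hv : pvKeymap.get? (PySem.Str.slice (PySem.Str.strip (PySem.Str.lower description))
        (some p.1) (some (p.1 + p.2))) with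
    | none => rfl
    | some hit => cases b <;> rfl
  rw [hfun, foldl_hitF]
  have h := fold_eq_scan (PySem.Str.strip (PySem.Str.lower description))
  simp only [pvHits, pvPairsOf] at h
  exact h

-- ---- the A-side reduction (keyword cascade = first-match scan) ----

theorem hv_sub (desc : String) (h : PySem.Str.isIn "transformer" desc = false) :
    PySem.Str.isIn "hv transformer" desc = false := by
  rw [(Bool.not_eq_true _).symm] at h ⊢
  intro hin
  exact h ((PySem.Str.isIn_iff_infix _ _).mpr
    (List.IsInfix.trans (by decide) ((PySem.Str.isIn_iff_infix _ _).mp hin)))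

theorem eb_sub (desc : String) (h : PySem.Str.isIn "transformer" desc = false) :
    PySem.Str.isIn "eb transformer" desc = false := by
  rw [(Bool.not_eq_true _).symm] at h ⊢
  intro hin
  exact h ((PySem.Str.isIn_iff_infix _ _).mpr
    (List.IsInfix.trans (by decide) ((PySem.Str.isIn_iff_infix _ _).mp hin)))

theorem wc_sub (desc : String) (h : PySem.Str.isIn "cooler" desc = false) :
    PySem.Str.isIn "water cooler" desc = false := by
  rw [(Bool.not_eq_true _).symm] at h ⊢
  intro hin
  exact h ((PySem.Str.isIn_iff_infix _ _).mpr
    (List.IsInfix.trans (by decide) ((PySem.Str.isIn_iff_infix _ _).mp hin)))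

-- scanning a block of rules that share one label is the same as `any` over its keywords
theorem scan_group (kws : List String) (label : String) (rest : List (String × String))
    (desc : String) :
    pvScanRules (kws.map (fun k => (k, label)) ++ rest) desc =
      (if kws.any (fun kw => PySem.Str.isIn kw desc) then label
       else pvScanRules rest desc) := by
  induction kws with
  | nil => simp
  | cons k ks ih =>
      simp only [List.map_cons, List.cons_append, pvScanRules, List.any_cons, ih]
      split_ifs <;> try rfl
      all_goals simp_all only [Bool.or_eq_true, not_or] <;> tauto

-- the two keyword cascades agree on every search string
theorem core_eq (desc : String) :
    (if ["gearbox", "gear box", "gear oil", "planetary bearing"].any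
          (fun kw => PySem.Str.isIn kw desc) then "gearbox"
     else if ["generator bearing", "stator winding", "generator temperature",
              "generator cooling", "slip ring", "rotor bearing"].any
          (fun kw => PySem.Str.isIn kw desc) then "generator_bearings"
     else if ["transformer", "transformator", "hv transformer"].any
          (fun kw => PySem.Str.isIn kw desc) then "transformer"
     else if ["hydraulic"].any (fun kw => PySem.Str.isIn kw desc) then "hydraulic"
     else if PySem.Str.isIn "electrical cabinet" desc then "unmatched"
     else if ["ambient", "nacelle temp", "outside temp", "nacelle outside", "hub temp"].any
          (fun kw => PySem.Str.isIn kw desc) then "nacelle_ambient"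
     else if ["cooling", "vcs", "water temp", "cooler", "water cooler"].any
          (fun kw => PySem.Str.isIn kw desc) then "cooling"
     else if PySem.Str.isIn "axial bearing" desc then "generator_bearings"
     else if PySem.Str.isIn "motor temp" desc then "unmatched"
     else if ["converter", "inverter", "igbt"].any (fun kw => PySem.Str.isIn kw desc) then "unmatched"
     else if ["electrical cabinet", "control box", "board temp", "busbar",
              "split ring chamber", "platform"].any
          (fun kw => PySem.Str.isIn kw desc) then "unmatched"
     else if ["hub controller", "top nacelle controller", "nose cone"].any
          (fun kw => PySem.Str.isIn kw desc) then "nacelle_ambient"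
     else if ["vcp-board", "choke coil"].any (fun kw => PySem.Str.isIn kw desc) then "cooling"
     else if PySem.Str.isIn "oil temp" desc &&
             (PySem.Str.isIn "transformer" desc || PySem.Str.isIn "eb transformer" desc) then
       "transformer"
     else "unmatched") = pvScanRules pvRules desc := by
  have h2 := hv_sub desc
  have h3 := eb_sub desc
  have h5 := wc_sub desc
  rw [show pvRules =
      (["gearbox", "gear box", "gear oil", "planetary bearing"].map (fun k => (k, "gearbox"))) ++
      ((["generator bearing", "stator winding", "generator temperature", "generator cooling",
         "slip ring", "rotor bearing"].map (fun k => (k, "generator_bearings"))) ++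
      ((["transformer", "transformator"].map (fun k => (k, "transformer"))) ++
      ((["hydraulic"].map (fun k => (k, "hydraulic"))) ++
      ((["electrical cabinet"].map (fun k => (k, "unmatched"))) ++
      ((["ambient", "nacelle temp", "outside temp", "nacelle outside", "hub temp"].map
          (fun k => (k, "nacelle_ambient"))) ++
      ((["cooling", "vcs", "water temp", "cooler"].map (fun k => (k, "cooling"))) ++
      ((["axial bearing"].map (fun k => (k, "generator_bearings"))) ++
      ((["motor temp"].map (fun k => (k, "unmatched"))) ++
      ((["converter", "inverter", "igbt"].map (fun k => (k, "unmatched"))) ++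
      ((["control box", "board temp", "busbar", "split ring chamber", "platform"].map
          (fun k => (k, "unmatched"))) ++
      ((["hub controller", "top nacelle controller", "nose cone"].map
          (fun k => (k, "nacelle_ambient"))) ++
      ((["vcp-board", "choke coil"].map (fun k => (k, "cooling"))) ++
      ([] : List (String × String))))))))))))))
    from rfl]
  rw [scan_group, scan_group, scan_group, scan_group, scan_group, scan_group, scan_group,
      scan_group, scan_group, scan_group, scan_group, scan_group, scan_group]
  simp only [List.any_cons, List.any_nil, Bool.or_false, pvScanRules]
  by_cases ht : PySem.Str.isIn "transformer" desc = true <;>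
  by_cases hec : PySem.Str.isIn "electrical cabinet" desc = true <;>
  by_cases hc : PySem.Str.isIn "cooler" desc = true <;>
    (try simp at ht) <;> (try simp at hec) <;> (try simp at hc) <;>
    (try simp at h2) <;> (try simp at h3) <;> (try simp at h5) <;>
    simp [ht, hec, hc, h2, h3, h5]

-- ===== VERDICT (by name: the statement is the Claim_ definition above) =====
theorem classify_sensor_spec : Claim_equal_classify_sensor := by
  intro description _
  unfold Spec_classify_sensor
  rw [alt_eq_scan]
  unfold classify_sensor
  exact core_eq _
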